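-- pv_equiv track=rewrite | github.com/prashant2109/redis_info | utils/numbercleanup.py | get_decimal_cleanup
-- ===== SOURCE A (Python) =====
-- def get_decimal_cleanup(value):
--     val = value.strip()
--     tlst = []
--     for i, ch in enumerate(val[:]):
--         if ch in ['.']:
--             tlst.append(i)
--         pass
--     if tlst:
--         tmpidx = tlst[-1]
--         val = val[:tmpidx].replace('.', '') + val[tmpidx:]
--         pass
--     return val
-- ===== SOURCE B (Python) =====
-- def get_decimal_cleanup(value):
--     val = value.strip()
--     n = val.count('.')
--     if n:
--         val = val.replace('.', '', n - 1)
--     return val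
-- ===== Notes on version B (the rewrite author's own statement) =====
-- stated objective: simpler
-- what changed: B replaces A's python-level index-collecting loop, last-index lookup and slice/replace/concat reassembly with a single count of the dots followed by one bounded replace removing the first n-1 dots.
import Mathlib
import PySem

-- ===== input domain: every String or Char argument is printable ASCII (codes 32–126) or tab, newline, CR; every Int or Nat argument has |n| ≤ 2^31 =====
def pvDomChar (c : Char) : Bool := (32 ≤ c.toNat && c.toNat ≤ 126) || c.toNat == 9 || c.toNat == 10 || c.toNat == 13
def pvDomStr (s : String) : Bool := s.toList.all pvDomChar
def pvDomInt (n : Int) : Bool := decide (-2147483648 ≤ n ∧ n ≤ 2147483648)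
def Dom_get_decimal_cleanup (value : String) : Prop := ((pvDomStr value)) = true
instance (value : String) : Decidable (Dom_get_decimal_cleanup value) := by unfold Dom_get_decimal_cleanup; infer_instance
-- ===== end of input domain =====

-- B strips the string, counts the dots, and removes the first n-1 of them with one bounded
-- replace, instead of A's index-collecting loop plus slice/replace/concat; objective: simpler.

-- ===== PORT A =====
def get_decimal_cleanup (value : String) : String :=
  let val := PySem.Str.strip value
  let tlst := (PySem.List.enumerate (PySem.Str.slice val none none).toList).foldl
      (fun acc p => if p.2 ∈ ['.'] then acc ++ [p.1] else acc) ([] : List Int)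
  if tlst ≠ [] then
    let tmpidx := (PySem.List.pyGet? tlst (-1)).getD 0   -- tlst[-1]; tlst is nonempty here, so pyGet? is some
    PySem.Str.replace (PySem.Str.slice val none (some tmpidx)) "." "" ++ PySem.Str.slice val (some tmpidx) none
  else val

-- ===== PORT B =====
-- hand port of val.replace('.', '', k) for the one-char pattern '.' and empty replacement:
-- drop the first k occurrences of ch (exact on this usage: single-char old, empty new)
def removeCharCount (ch : Char) : List Char → Nat → List Char
  | l, 0 => l
  | [], _ + 1 => []
  | c :: t, k + 1 => if c = ch then removeCharCount ch t k else c :: removeCharCount ch t (k + 1)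

def get_decimal_cleanup_alt (value : String) : String :=
  let val := PySem.Str.strip value
  let n := PySem.Str.count val "."
  if n ≠ 0 then String.ofList (removeCharCount '.' val.toList (n - 1)) else val

-- ===== PRECONDITION & SPEC =====
def Spec_get_decimal_cleanup (value : String) (out : String) : Prop := out = get_decimal_cleanup_alt value
instance (value : String) (out : String) : Decidable (Spec_get_decimal_cleanup value out) := by unfold Spec_get_decimal_cleanup; infer_instance

-- ===== CLAIM (what is proved, stated in full; the proofs are below) =====
def Claim_equal_get_decimal_cleanup : Prop := ∀ (value : String), Dom_get_decimal_cleanup value → Spec_get_decimal_cleanup value (get_decimal_cleanup value)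

-- ===== LEMMAS AND PROOFS =====

-- index of the LAST '.' in a char list (meaningful when the list contains a dot)
def lastDot : List Char → Nat
  | [] => 0
  | _ :: t => if t.count '.' = 0 then 0 else lastDot t + 1

-- the Int indices A's loop collects
def dotIdx (l : List Char) (s : Int) : List Int :=
  ((PySem.List.enumerate l s).filter (fun x => decide (x.2 ∈ ['.']))).map (·.1)

theorem dotIdx_nil (s : Int) : dotIdx [] s = [] := rfl

theorem dotIdx_cons (c : Char) (t : List Char) (s : Int) :
    dotIdx (c :: t) s = (if c = '.' then [s] else []) ++ dotIdx t (s + 1) := by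
  rcases eq_or_ne c '.' with h | h <;>
    simp [dotIdx, PySem.List.enumerate_cons, h]

theorem dotIdx_eq_nil_iff (l : List Char) (s : Int) : dotIdx l s = [] ↔ l.count '.' = 0 := by
  induction l generalizing s with
  | nil => simp [dotIdx_nil]
  | cons c t ih =>
    rw [dotIdx_cons]
    rcases eq_or_ne c '.' with h | h <;>
      simp [h, ih]

theorem dotIdx_getLast? (l : List Char) (s : Int) (h : l.count '.' ≠ 0) :
    (dotIdx l s).getLast? = some (s + lastDot l) := by
  induction l generalizing s with
  | nil => simp [List.count_nil] at h
  | cons c t ih =>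
    rw [dotIdx_cons]
    by_cases ht : t.count '.' = 0
    · have hc : c = '.' := by
        rcases eq_or_ne c '.' with h' | h'
        · exact h'
        · simp [h', ht] at h
      have : dotIdx t (s + 1) = [] := (dotIdx_eq_nil_iff t (s + 1)).mpr ht
      simp [hc, this, lastDot, ht]
    · have hne : dotIdx t (s + 1) ≠ [] := by
        intro hnil
        exact ht ((dotIdx_eq_nil_iff t (s + 1)).mp hnil)
      rw [List.getLast?_append_of_ne_nil _ hne, ih (s + 1) ht]
      simp [lastDot, ht]
      ring

theorem pyGet?_neg_one {α : Type} (xs : List α) (h : xs ≠ []) :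
    PySem.List.pyGet? xs (-1) = xs.getLast? := by
  have hlen : 0 < xs.length := List.length_pos_iff.mpr h
  rw [PySem.List.pyGet?, PySem.List.pyIdx?]
  rw [if_neg (by omega), if_pos (by omega)]
  simp [List.getLast?_eq_getElem?]

theorem count_go_dot : ∀ (fuel : Nat) (l : List Char) (acc : Nat), l.length ≤ fuel →
    PySem.Chars.count.go ['.'] fuel l acc = acc + l.count '.'
  | 0, l, acc, h => by
    have : l = [] := List.eq_nil_of_length_eq_zero (by omega)
    subst this; simp [PySem.Chars.count.go]
  | fuel + 1, [], acc, _ => by simp [PySem.Chars.count.go]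
  | fuel + 1, c :: t, acc, h => by
    rw [PySem.Chars.count.go]
    rcases eq_or_ne c '.' with hc | hc
    · rw [if_pos (by simp [hc, List.isPrefixOf])]
      simp only [List.length_singleton, List.drop_one, List.tail_cons]
      rw [count_go_dot fuel t (acc + 1) (by simpa using h)]
      simp [hc]; omega
    · rw [if_neg (by simp [List.isPrefixOf]; exact fun h' => hc h'.symm)]
      rw [count_go_dot fuel t acc (by simpa using h)]
      simp [hc]

theorem count_dot (l : List Char) : PySem.Chars.count l ['.'] = l.count '.' := by
  rw [PySem.Chars.count, if_neg (by simp)]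
  simpa using count_go_dot l.length l 0 le_rfl

theorem replace_go_dot : ∀ (fuel : Nat) (l acc : List Char), l.length ≤ fuel →
    PySem.Chars.replace.go ['.'] [] fuel l acc = acc.reverse ++ l.filter (fun c => !(c == '.'))
  | 0, l, acc, h => by
    have : l = [] := List.eq_nil_of_length_eq_zero (by omega)
    subst this; simp [PySem.Chars.replace.go]
  | fuel + 1, [], acc, _ => by simp [PySem.Chars.replace.go]
  | fuel + 1, c :: t, acc, h => by
    rw [PySem.Chars.replace.go]
    rcases eq_or_ne c '.' with hc | hc
    · rw [if_pos (by simp [hc, List.isPrefixOf])]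
      simp only [List.length_singleton, List.drop_one, List.tail_cons, List.reverse_nil,
        List.nil_append]
      rw [replace_go_dot fuel t acc (by simpa using h)]
      simp [hc]
    · rw [if_neg (by simp [List.isPrefixOf]; exact fun h' => hc h'.symm)]
      rw [replace_go_dot fuel t (c :: acc) (by simpa using h)]
      simp [hc]

theorem replace_dot (l : List Char) :
    PySem.Chars.replace l ['.'] [] = l.filter (fun c => !(c == '.')) := by
  rw [PySem.Chars.replace, if_neg (by simp)]
  simpa using replace_go_dot l.length l [] le_rfl

theorem removeCharCount_cons_ne (ch c : Char) (t : List Char) (k : Nat) (h : c ≠ ch) :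
    removeCharCount ch (c :: t) k = c :: removeCharCount ch t k := by
  cases k <;> simp [removeCharCount, h]

-- the heart of the equivalence: dropping the first (count - 1) dots = deleting every dot
-- strictly before the last one
theorem removeCharCount_eq (l : List Char) (h : l.count '.' ≠ 0) :
    removeCharCount '.' l (l.count '.' - 1) =
      (l.take (lastDot l)).filter (fun c => !(c == '.')) ++ l.drop (lastDot l) := by
  induction l with
  | nil => simp at h
  | cons c t ih =>
    rcases eq_or_ne c '.' with hc | hc
    · subst hc
      by_cases ht : t.count '.' = 0
      · have hcount : ('.' :: t).count '.' = 1 := by simp [ht]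
        simp [hcount, lastDot, ht, removeCharCount]
      · have hcount : ('.' :: t).count '.' = t.count '.' + 1 := by simp
        obtain ⟨m, hm⟩ : ∃ m, t.count '.' = m + 1 := ⟨t.count '.' - 1, by omega⟩
        rw [hcount, hm]
        simp only [Nat.add_sub_cancel, removeCharCount]
        have := ih ht
        rw [hm] at this
        simpa [lastDot, ht, List.take_succ_cons, List.drop_succ_cons] using this
    · have hcount : (c :: t).count '.' = t.count '.' := by simp [hc]
      have ht : t.count '.' ≠ 0 := by rw [hcount] at h; exact h
      rw [hcount, removeCharCount_cons_ne '.' c t _ hc, ih ht]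
      simp [lastDot, ht, List.take_succ_cons, List.drop_succ_cons, hc]

-- ===== VERDICT (by name: the statement is the Claim_ definition above) =====
theorem get_decimal_cleanup_spec : Claim_equal_get_decimal_cleanup := by
  intro value _
  unfold Spec_get_decimal_cleanup
  simp only [get_decimal_cleanup, get_decimal_cleanup_alt]
  set val := PySem.Str.strip value with hval
  set l := val.toList with hl
  have hslice : (PySem.Str.slice val none none).toList = l := by
    simp [PySem.Str.toList_slice, PySem.Chars.slice_eq_listSlice, PySem.List.slice]
    rw [← String.length_toList, List.take_length]
  have htlst : (PySem.List.enumerate (PySem.Str.slice val none none).toList).foldl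
      (fun acc p => if p.2 ∈ ['.'] then acc ++ [p.1] else acc) ([] : List Int) = dotIdx l 0 := by
    rw [hslice,
      PySem.List.foldl_append_ite (fun x : Int × Char => x.2 ∈ ['.']) (fun x : Int × Char => x.1)]
    simp [dotIdx]
  have hcnt : PySem.Str.count val "." = l.count '.' := by
    rw [PySem.Str.count_eq]
    simpa using count_dot l
  rw [htlst, hcnt]
  by_cases h : l.count '.' = 0
  · have : dotIdx l 0 = [] := (dotIdx_eq_nil_iff l 0).mpr h
    simp [this, h]
  · have hne : dotIdx l 0 ≠ [] := fun hnil => h ((dotIdx_eq_nil_iff l 0).mp hnil)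
    rw [if_pos hne, if_pos h]
    have hget : (PySem.List.pyGet? (dotIdx l 0) (-1)).getD 0 = (lastDot l : Int) := by
      rw [pyGet?_neg_one _ hne, dotIdx_getLast? l 0 h]
      simp
    rw [hget]
    apply String.toList_inj.mp
    rw [String.toList_append, PySem.Str.toList_replace, PySem.Str.toList_slice,
      PySem.Str.toList_slice]
    simp only [PySem.Chars.slice_eq_listSlice, ← hl]
    rw [PySem.List.slice_to _ (Int.natCast_nonneg _), PySem.List.slice_from _ (Int.natCast_nonneg _)]
    have hstr : ("." : String).toList = ['.'] := rfl
    have hemp : ("" : String).toList = [] := rfl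
    rw [hstr, hemp, replace_dot]
    rw [String.toList_ofList, removeCharCount_eq l h]
    simp
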